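-- pv_equiv track=rewrite | github.com/FishFinsMertz/PYTHON-SLOT-MACHINE | main.py | congratulate
-- ===== SOURCE A (Python) =====
-- from collections import Counter
--
-- def congratulate(rolls):
--     counter = Counter(rolls)
--
--     congratulation_message = ""
--
--     for roll, count in counter.most_common():
--         if count == 7:
--             congratulation_message += f"x7 JackPot! you win $10000 and a permanent ban from this casino for winning too hard{roll}!\n"
--         elif count == 6:
--             congratulation_message += f"x6 JackPot! you win $5000 {roll}!\n"
--         elif count == 5:
--             congratulation_message += f"x5 JackPot! you win $500 {roll}!\n"
--         elif count == 4:
--             congratulation_message += f"x4 JackPot! you win $100 {roll}!\n"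
--         elif count == 3:
--             congratulation_message += f"x3 Jackpot! you win $50 {roll}!\n"
--         elif count == 2:
--             congratulation_message += f"x2 Jackpot! you win $10 {roll}!\n"
--
--     return congratulation_message
-- ===== SOURCE B (Python) =====
-- from collections import Counter
--
-- def congratulate(rolls):
--     counter = Counter(rolls)
--
--     prefixes = {
--         7: "x7 JackPot! you win $10000 and a permanent ban from this casino for winning too hard",
--         6: "x6 JackPot! you win $5000 ",
--         5: "x5 JackPot! you win $500 ",
--         4: "x4 JackPot! you win $100 ",
--         3: "x3 Jackpot! you win $50 ",
--         2: "x2 Jackpot! you win $10 ",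
--     }
--
--     message = ""
--     for target, prefix in prefixes.items():
--         for roll, count in counter.items():
--             if count == target:
--                 message += prefix + roll + "!\n"
--     return message
-- ===== Notes on version B (the rewrite author's own statement) =====
-- stated objective: alternative
-- what changed: Replaces the most_common() sort over the counted rolls by a bucket pass: an outer loop over the fixed count levels 7..2 and an inner scan of the counter in insertion order, which reproduces most_common's stable count-descending order without sorting.
import Mathlib
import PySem

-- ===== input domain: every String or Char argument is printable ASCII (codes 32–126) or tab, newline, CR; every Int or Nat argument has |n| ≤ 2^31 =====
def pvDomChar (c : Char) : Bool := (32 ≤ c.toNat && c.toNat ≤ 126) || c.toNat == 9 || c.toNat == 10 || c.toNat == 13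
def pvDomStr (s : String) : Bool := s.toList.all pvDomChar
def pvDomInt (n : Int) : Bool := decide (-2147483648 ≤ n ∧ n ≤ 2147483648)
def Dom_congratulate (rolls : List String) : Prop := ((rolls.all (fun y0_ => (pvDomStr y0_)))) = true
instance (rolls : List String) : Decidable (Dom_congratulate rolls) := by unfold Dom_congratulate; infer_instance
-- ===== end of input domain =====

-- B replaces A's most_common() sort by a bucket pass over the fixed count levels 7..2
-- (same output; proved equal via stability of the sort under per-level filtering).


-- ===== PORT A =====
def congratulate (rolls : List String) : String :=
  let counter := PySem.Dict.counter rolls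
  let mc := PySem.List.sorted counter.items (fun p => p.2) true  -- counter.most_common()
  mc.foldl (fun m p =>
    if p.2 == 7 then m ++ "x7 JackPot! you win $10000 and a permanent ban from this casino for winning too hard" ++ p.1 ++ "!\n"
    else if p.2 == 6 then m ++ "x6 JackPot! you win $5000 " ++ p.1 ++ "!\n"
    else if p.2 == 5 then m ++ "x5 JackPot! you win $500 " ++ p.1 ++ "!\n"
    else if p.2 == 4 then m ++ "x4 JackPot! you win $100 " ++ p.1 ++ "!\n"
    else if p.2 == 3 then m ++ "x3 Jackpot! you win $50 " ++ p.1 ++ "!\n"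
    else if p.2 == 2 then m ++ "x2 Jackpot! you win $10 " ++ p.1 ++ "!\n"
    else m) ""

-- ===== PORT B =====
-- the 'prefixes' dict of Source B, as its items list
def pvPrefixes : List (Int × String) :=
  [(7, "x7 JackPot! you win $10000 and a permanent ban from this casino for winning too hard"),
   (6, "x6 JackPot! you win $5000 "),
   (5, "x5 JackPot! you win $500 "),
   (4, "x4 JackPot! you win $100 "),
   (3, "x3 Jackpot! you win $50 "),
   (2, "x2 Jackpot! you win $10 ")]

def congratulate_alt (rolls : List String) : String :=
  let counter := PySem.Dict.counter rolls
  pvPrefixes.foldl (fun m tp =>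
    counter.items.foldl (fun m p =>
      if p.2 == tp.1 then m ++ tp.2 ++ p.1 ++ "!\n" else m) m) ""

-- ===== PRECONDITION & SPEC =====
def Spec_congratulate (rolls : List String) (out : String) : Prop := out = congratulate_alt rolls
instance (rolls : List String) (out : String) : Decidable (Spec_congratulate rolls out) := by unfold Spec_congratulate; infer_instance

-- ===== CLAIM (what is proved, stated in full; the proofs are below) =====
def Claim_equal_congratulate : Prop := ∀ (rolls : List String), Dom_congratulate rolls → Spec_congratulate rolls (congratulate rolls)

-- ===== LEMMAS AND PROOFS =====

-- the message A emits for one (roll, count) pair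
def pvMsg (p : String × Int) : String :=
  if p.2 == 7 then "x7 JackPot! you win $10000 and a permanent ban from this casino for winning too hard" ++ p.1 ++ "!\n"
  else if p.2 == 6 then "x6 JackPot! you win $5000 " ++ p.1 ++ "!\n"
  else if p.2 == 5 then "x5 JackPot! you win $500 " ++ p.1 ++ "!\n"
  else if p.2 == 4 then "x4 JackPot! you win $100 " ++ p.1 ++ "!\n"
  else if p.2 == 3 then "x3 Jackpot! you win $50 " ++ p.1 ++ "!\n"
  else if p.2 == 2 then "x2 Jackpot! you win $10 " ++ p.1 ++ "!\n"
  else ""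

-- concatenation of f over a list
def pvCat (f : String × Int → String) : List (String × Int) → String
  | [] => ""
  | p :: t => f p ++ pvCat f t

def pvIns (x : String × Int) (ys : List (String × Int)) : List (String × Int) :=
  PySem.List.insertBy (fun a b => decide (b.2 < a.2)) x ys

theorem pvFoldl_append (f : String × Int → String) (l : List (String × Int)) (s : String) :
    l.foldl (fun m p => m ++ f p) s = s ++ pvCat f l := by
  induction l generalizing s with
  | nil => simp [pvCat]
  | cons x t ih => simp [pvCat, List.foldl_cons, ih, String.append_assoc]

theorem pvIns_pairwise (x : String × Int) (ys : List (String × Int))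
    (h : ys.Pairwise (fun a b => b.2 ≤ a.2)) :
    (pvIns x ys).Pairwise (fun a b => b.2 ≤ a.2) := by
  induction ys with
  | nil => simp [pvIns, PySem.List.insertBy]
  | cons y t ih =>
    rcases List.pairwise_cons.mp h with ⟨hy, ht⟩
    by_cases hb : y.2 < x.2
    · simp only [pvIns, PySem.List.insertBy, hb, decide_true, if_pos rfl]
      refine List.pairwise_cons.mpr ⟨?_, h⟩
      intro z hz
      rcases List.mem_cons.mp hz with rfl | hz
      · omega
      · have := hy z hz; omega
    · simp only [pvIns, PySem.List.insertBy, hb, decide_false, Bool.false_eq_true, if_false]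
      refine List.pairwise_cons.mpr ⟨?_, ih ht⟩
      intro z hz
      have := (PySem.List.mem_insertBy _ _ _ _).mp hz
      rcases this with rfl | hz
      · omega
      · exact hy z hz

theorem pvIns_filter_eq (x : String × Int) (ys : List (String × Int))
    (h : ys.Pairwise (fun a b => b.2 ≤ a.2)) :
    (pvIns x ys).filter (fun p => p.2 == x.2) = ys.filter (fun p => p.2 == x.2) ++ [x] := by
  induction ys with
  | nil => simp [pvIns, PySem.List.insertBy]
  | cons y t ih =>
    rcases List.pairwise_cons.mp h with ⟨hy, ht⟩
    by_cases hb : y.2 < x.2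
    · simp only [pvIns, PySem.List.insertBy, hb, decide_true, if_pos rfl]
      have hnil : (y :: t).filter (fun p => p.2 == x.2) = [] := by
        rw [List.filter_eq_nil_iff]
        intro z hz
        rcases List.mem_cons.mp hz with rfl | hz
        · simp; omega
        · have := hy z hz; simp; omega
      simp [List.filter_cons, hnil]
    · simp only [pvIns, PySem.List.insertBy, hb, decide_false, Bool.false_eq_true, if_false]
      rw [List.filter_cons, List.filter_cons]
      by_cases hq : y.2 == x.2 <;> simp [hq] <;> simpa [pvIns] using ih ht

theorem pvIns_filter_ne (x : String × Int) (ys : List (String × Int)) (t : Int) (hne : x.2 ≠ t) :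
    (pvIns x ys).filter (fun p => p.2 == t) = ys.filter (fun p => p.2 == t) := by
  induction ys with
  | nil => simp [pvIns, PySem.List.insertBy, hne]
  | cons y ys' ih =>
    by_cases hb : y.2 < x.2
    · simp only [pvIns, PySem.List.insertBy, hb, decide_true, if_pos rfl]
      simp [List.filter_cons, hne]
    · simp only [pvIns, PySem.List.insertBy, hb, decide_false, Bool.false_eq_true, if_false]
      rw [List.filter_cons, List.filter_cons]
      by_cases hq : y.2 == t <;> simp [hq] <;> simpa [pvIns] using ih

theorem pvFoldl_ins_filter (t : Int) (l : List (String × Int)) :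
    ∀ acc, acc.Pairwise (fun a b => b.2 ≤ a.2) →
    (l.foldl (fun acc x => pvIns x acc) acc).filter (fun p => p.2 == t)
      = acc.filter (fun p => p.2 == t) ++ l.filter (fun p => p.2 == t) := by
  induction l with
  | nil => intro acc _; simp
  | cons x l' ih =>
    intro acc hacc
    rw [List.foldl_cons, ih _ (pvIns_pairwise x acc hacc)]
    by_cases hx : x.2 = t
    · subst hx
      rw [pvIns_filter_eq x acc hacc, List.filter_cons]
      simp
    · rw [pvIns_filter_ne x acc t hx, List.filter_cons]
      simp [hx]

theorem pvSorted_filter (t : Int) (l : List (String × Int)) :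
    (PySem.List.sorted l (fun p => p.2) true).filter (fun p => p.2 == t)
      = l.filter (fun p => p.2 == t) := by
  rw [PySem.List.sorted_rev_eq_foldl_insertBy]
  have := pvFoldl_ins_filter t l [] (by simp)
  simpa [pvIns] using this

-- level-t message of B
def pvMsgAt (pre : String) (p : String × Int) : String := pre ++ p.1 ++ "!\n"

theorem pvFilter_high_nil (l : List (String × Int)) (k t : Int)
    (hk : ∀ y ∈ l, y.2 ≤ k) (hlt : k < t) :
    l.filter (fun p => p.2 == t) = [] := by
  rw [List.filter_eq_nil_iff]
  intro z hz
  have := hk z hz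
  simp; omega

theorem pvGrouping (l : List (String × Int)) (h : l.Pairwise (fun a b => b.2 ≤ a.2)) :
    pvCat pvMsg l =
      pvCat (pvMsgAt "x7 JackPot! you win $10000 and a permanent ban from this casino for winning too hard") (l.filter (fun p => p.2 == 7)) ++
      pvCat (pvMsgAt "x6 JackPot! you win $5000 ") (l.filter (fun p => p.2 == 6)) ++
      pvCat (pvMsgAt "x5 JackPot! you win $500 ") (l.filter (fun p => p.2 == 5)) ++
      pvCat (pvMsgAt "x4 JackPot! you win $100 ") (l.filter (fun p => p.2 == 4)) ++
      pvCat (pvMsgAt "x3 Jackpot! you win $50 ") (l.filter (fun p => p.2 == 3)) ++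
      pvCat (pvMsgAt "x2 Jackpot! you win $10 ") (l.filter (fun p => p.2 == 2)) := by
  induction l with
  | nil => simp [pvCat]
  | cons x tl ih =>
    rcases List.pairwise_cons.mp h with ⟨hx, htl⟩
    have ih' := ih htl
    by_cases h7 : x.2 = 7
    · simp [pvCat, List.filter_cons, h7, pvMsg, pvMsgAt, ih', String.append_assoc]
    · by_cases h6 : x.2 = 6
      · have e7 : tl.filter (fun p => p.2 == 7) = [] :=
          pvFilter_high_nil tl x.2 7 hx (by omega)
        simp [pvCat, List.filter_cons, h6, h7, e7, pvMsg, pvMsgAt, ih', String.append_assoc]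
      · by_cases h5 : x.2 = 5
        · have e7 : tl.filter (fun p => p.2 == 7) = [] := pvFilter_high_nil tl x.2 7 hx (by omega)
          have e6 : tl.filter (fun p => p.2 == 6) = [] := pvFilter_high_nil tl x.2 6 hx (by omega)
          simp [pvCat, List.filter_cons, h5, h6, h7, e7, e6, pvMsg, pvMsgAt, ih', String.append_assoc]
        · by_cases h4 : x.2 = 4
          · have e7 : tl.filter (fun p => p.2 == 7) = [] := pvFilter_high_nil tl x.2 7 hx (by omega)
            have e6 : tl.filter (fun p => p.2 == 6) = [] := pvFilter_high_nil tl x.2 6 hx (by omega)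
            have e5 : tl.filter (fun p => p.2 == 5) = [] := pvFilter_high_nil tl x.2 5 hx (by omega)
            simp [pvCat, List.filter_cons, h4, h5, h6, h7, e7, e6, e5, pvMsg, pvMsgAt, ih', String.append_assoc]
          · by_cases h3 : x.2 = 3
            · have e7 : tl.filter (fun p => p.2 == 7) = [] := pvFilter_high_nil tl x.2 7 hx (by omega)
              have e6 : tl.filter (fun p => p.2 == 6) = [] := pvFilter_high_nil tl x.2 6 hx (by omega)
              have e5 : tl.filter (fun p => p.2 == 5) = [] := pvFilter_high_nil tl x.2 5 hx (by omega)
              have e4 : tl.filter (fun p => p.2 == 4) = [] := pvFilter_high_nil tl x.2 4 hx (by omega)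
              simp [pvCat, List.filter_cons, h3, h4, h5, h6, h7, e7, e6, e5, e4, pvMsg, pvMsgAt, ih', String.append_assoc]
            · by_cases h2 : x.2 = 2
              · have e7 : tl.filter (fun p => p.2 == 7) = [] := pvFilter_high_nil tl x.2 7 hx (by omega)
                have e6 : tl.filter (fun p => p.2 == 6) = [] := pvFilter_high_nil tl x.2 6 hx (by omega)
                have e5 : tl.filter (fun p => p.2 == 5) = [] := pvFilter_high_nil tl x.2 5 hx (by omega)
                have e4 : tl.filter (fun p => p.2 == 4) = [] := pvFilter_high_nil tl x.2 4 hx (by omega)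
                have e3 : tl.filter (fun p => p.2 == 3) = [] := pvFilter_high_nil tl x.2 3 hx (by omega)
                simp [pvCat, List.filter_cons, h2, h3, h4, h5, h6, h7, e7, e6, e5, e4, e3, pvMsg, pvMsgAt, ih', String.append_assoc]
              · simp [pvCat, List.filter_cons, h2, h3, h4, h5, h6, h7, pvMsg, pvMsgAt, ih']

theorem pvMain (l : List (String × Int)) :
    (PySem.List.sorted l (fun p => p.2) true).foldl (fun m p =>
      if p.2 == 7 then m ++ "x7 JackPot! you win $10000 and a permanent ban from this casino for winning too hard" ++ p.1 ++ "!\n"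
      else if p.2 == 6 then m ++ "x6 JackPot! you win $5000 " ++ p.1 ++ "!\n"
      else if p.2 == 5 then m ++ "x5 JackPot! you win $500 " ++ p.1 ++ "!\n"
      else if p.2 == 4 then m ++ "x4 JackPot! you win $100 " ++ p.1 ++ "!\n"
      else if p.2 == 3 then m ++ "x3 Jackpot! you win $50 " ++ p.1 ++ "!\n"
      else if p.2 == 2 then m ++ "x2 Jackpot! you win $10 " ++ p.1 ++ "!\n"
      else m) ""
    = pvPrefixes.foldl (fun m tp =>
        l.foldl (fun m p => if p.2 == tp.1 then m ++ tp.2 ++ p.1 ++ "!\n" else m) m) "" := by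
  -- A's loop body is m ++ pvMsg p
  have hbody : ∀ (s : List (String × Int)) (init : String),
      s.foldl (fun m p =>
        if p.2 == 7 then m ++ "x7 JackPot! you win $10000 and a permanent ban from this casino for winning too hard" ++ p.1 ++ "!\n"
        else if p.2 == 6 then m ++ "x6 JackPot! you win $5000 " ++ p.1 ++ "!\n"
        else if p.2 == 5 then m ++ "x5 JackPot! you win $500 " ++ p.1 ++ "!\n"
        else if p.2 == 4 then m ++ "x4 JackPot! you win $100 " ++ p.1 ++ "!\n"
        else if p.2 == 3 then m ++ "x3 Jackpot! you win $50 " ++ p.1 ++ "!\n"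
        else if p.2 == 2 then m ++ "x2 Jackpot! you win $10 " ++ p.1 ++ "!\n"
        else m) init = s.foldl (fun m p => m ++ pvMsg p) init := by
    intro s init
    apply PySem.List.foldl_congr_mem
    intro m p _
    unfold pvMsg
    split_ifs <;> simp [String.append_assoc]
  rw [hbody]
  rw [pvFoldl_append]
  rw [pvGrouping _ (PySem.List.sorted_pairwise_rev l (fun p => p.2))]
  rw [pvSorted_filter, pvSorted_filter, pvSorted_filter, pvSorted_filter, pvSorted_filter, pvSorted_filter]
  -- expand B's fixed outer loop
  show _ = List.foldl _ _ [(7, _), (6, _), (5, _), (4, _), (3, _), (2, _)]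
  simp only [List.foldl_cons, List.foldl_nil]
  rw [PySem.List.foldl_if_eq_foldl_filter, PySem.List.foldl_if_eq_foldl_filter,
      PySem.List.foldl_if_eq_foldl_filter, PySem.List.foldl_if_eq_foldl_filter,
      PySem.List.foldl_if_eq_foldl_filter, PySem.List.foldl_if_eq_foldl_filter]
  have hb : ∀ (pre : String) (s : List (String × Int)) (init : String),
      s.foldl (fun m p => m ++ pre ++ p.1 ++ "!\n") init
        = s.foldl (fun m p => m ++ pvMsgAt pre p) init := by
    intro pre s init
    apply PySem.List.foldl_congr_mem
    intro m p _
    simp [pvMsgAt, String.append_assoc]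
  rw [hb, hb, hb, hb, hb, hb]
  rw [pvFoldl_append, pvFoldl_append, pvFoldl_append, pvFoldl_append, pvFoldl_append, pvFoldl_append]
  simp [String.append_assoc]

-- ===== VERDICT (by name: the statement is the Claim_ definition above) =====
theorem congratulate_spec : Claim_equal_congratulate := by
  intro rolls _
  unfold Spec_congratulate congratulate congratulate_alt
  exact pvMain (PySem.Dict.counter rolls).items
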